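-- pv_equiv track=rewrite | github.com/mohamadsolkhannawawi/informatics-practicum-portfolio | Semester-4/Algorithm-Strategy-Analysis/04-Algorithm-Strategy-Analysis/CariAngkaHilangBiasa.py | findMuridHilang
-- ===== SOURCE A (Python) =====
-- def findMuridHilang(arr, N):
--     kiri, kanan = 0, N - 1
--
--     while kiri < kanan:
--         tengah = (kiri + kanan) // 2
--         if arr[tengah] == tengah:
--             kiri = tengah + 1
--         else:
--             kanan = tengah
--     return kiri
-- ===== SOURCE B (Python) =====
-- def findMuridHilang(arr, N):
--     # Recursive search over list slices: the segment still in play plus its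
--     # starting index, instead of an iterative (kiri, kanan) index loop.
--     if N <= 1:
--         return 0
--
--     def cari(seg, awal):
--         if not seg:
--             return awal
--         tengah = len(seg) // 2
--         if seg[tengah] == awal + tengah:
--             return cari(seg[tengah + 1:], awal + tengah + 1)
--         return cari(seg[:tengah], awal)
--
--     return cari(arr[:N - 1], 0)
-- ===== Notes on version B (the rewrite author's own statement) =====
-- stated objective: alternative
-- what changed: Replaces A's iterative (kiri, kanan) index loop over the whole array with a recursion over list slices (the segment still in play plus its starting index), probing the same cells.
-- outside the precondition, e.g. on findMuridHilang([9, 4, 2, -1, 8, 5], 9): A returns 3, B returns 0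
import Mathlib
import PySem

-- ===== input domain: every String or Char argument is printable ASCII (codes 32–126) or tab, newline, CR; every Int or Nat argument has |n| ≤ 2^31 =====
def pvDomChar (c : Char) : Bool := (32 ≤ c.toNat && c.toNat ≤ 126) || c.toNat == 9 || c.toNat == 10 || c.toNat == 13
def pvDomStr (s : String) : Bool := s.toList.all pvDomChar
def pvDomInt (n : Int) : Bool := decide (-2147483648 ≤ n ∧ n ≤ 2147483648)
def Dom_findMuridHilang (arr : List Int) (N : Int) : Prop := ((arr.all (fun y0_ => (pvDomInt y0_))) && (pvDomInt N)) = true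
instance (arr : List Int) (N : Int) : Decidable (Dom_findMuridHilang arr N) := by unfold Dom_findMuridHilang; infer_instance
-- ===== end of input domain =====

-- B replaces A's iterative (kiri, kanan) index loop by recursion over list slices
-- (the segment still in play plus its starting index); objective: alternative
-- decomposition, same probed cells, same cost.

-- ===== PORT A =====
-- while kiri < kanan: tengah = (kiri+kanan)//2; arr[tengah]==tengah ? kiri=tengah+1 : kanan=tengah.
-- arr[tengah] out of range (Python IndexError) → pyGet? = none; we stop with kiri there,
-- Pre_ excludes those inputs. The fuel argument is only a totality guard: the interval
-- shrinks by at least 1 per iteration, so (kanan - kiri).toNat iterations always suffice.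
def findMuridHilangLoop (arr : List Int) (fuel : Nat) (kiri kanan : Int) : Int :=
  match fuel with
  | 0 => kiri
  | fuel + 1 =>
    if kiri < kanan then
      let tengah := PySem.Int.floordiv (kiri + kanan) 2
      match PySem.List.pyGet? arr tengah with
      | none => kiri
      | some v =>
        if v == tengah then findMuridHilangLoop arr fuel (tengah + 1) kanan
        else findMuridHilangLoop arr fuel kiri tengah
    else kiri

def findMuridHilang (arr : List Int) (N : Int) : Int :=
  findMuridHilangLoop arr (N - 1).toNat 0 (N - 1)

-- ===== PORT B =====
-- cari(seg, awal): empty → awal; tengah = len(seg)//2 (a Nat: len//2 = Nat division);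
-- seg[tengah]==awal+tengah ? cari(seg[tengah+1:], awal+tengah+1) : cari(seg[:tengah], awal).
-- seg[tengah] always has 0 ≤ tengah < len(seg) here, so getD is exact; the nonnegative
-- slices seg[tengah+1:] and seg[:tengah] are exactly drop/take. The fuel argument is only
-- a totality guard: the segment shrinks at every call, so len(seg) steps always suffice.
def findMuridHilangCari (fuel : Nat) (seg : List Int) (awal : Int) : Int :=
  match fuel with
  | 0 => awal
  | fuel + 1 =>
    if seg.isEmpty then awal
    else
      let tengah := seg.length / 2
      if seg.getD tengah 0 == awal + tengah then
        findMuridHilangCari fuel (seg.drop (tengah + 1)) (awal + tengah + 1)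
      else
        findMuridHilangCari fuel (seg.take tengah) awal

-- arr[:N-1] with N ≥ 2 is PySem.List.slice arr none (some (N-1)) (= take, the guard
-- keeps the stop nonnegative).
def findMuridHilang_alt (arr : List Int) (N : Int) : Int :=
  if N ≤ 1 then 0
  else
    let seg := PySem.List.slice arr none (some (N - 1))
    findMuridHilangCari seg.length seg 0

-- ===== PRECONDITION & SPEC =====
-- Pre_ excludes 2 ≤ N > len(arr), where the binary-search probes can fall outside the
-- list and A may raise IndexError; on some such inputs A happens to return without an
-- out-of-range probe, and B clamps the slice and may return a different value.
def Pre_findMuridHilang (arr : List Int) (N : Int) : Prop :=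
  N ≤ 1 ∨ N ≤ (arr.length : Int)
instance (arr : List Int) (N : Int) : Decidable (Pre_findMuridHilang arr N) := by
  unfold Pre_findMuridHilang; infer_instance

def pvWitness_findMuridHilang : List Int × Int := ([0, 1, 2, 4, 5], 5)

def Spec_findMuridHilang (arr : List Int) (N : Int) (out : Int) : Prop := out = findMuridHilang_alt arr N
instance (arr : List Int) (N : Int) (out : Int) : Decidable (Spec_findMuridHilang arr N out) := by unfold Spec_findMuridHilang; infer_instance

-- ===== CLAIM (what is proved, stated in full; the proofs are below) =====
def Claim_equal_findMuridHilang : Prop := ∀ (arr : List Int) (N : Int), Dom_findMuridHilang arr N → Pre_findMuridHilang arr N → Spec_findMuridHilang arr N (findMuridHilang arr N)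

-- ===== LEMMAS AND PROOFS =====

-- A's loop on bounds (kiri, kanan) inside the list equals B's recursion on the
-- slice arr[kiri:kanan] with starting index kiri, for any sufficient fuels.
lemma loop_eq_cari (arr : List Int) :
    ∀ (fa fb : Nat) (kiri kanan : Int), 0 ≤ kiri → kiri ≤ kanan → kanan ≤ (arr.length : Int) →
      (kanan - kiri).toNat ≤ fa → (kanan - kiri).toNat ≤ fb →
      findMuridHilangLoop arr fa kiri kanan =
        findMuridHilangCari fb ((arr.take kanan.toNat).drop kiri.toNat) kiri := by
  intro fa
  induction fa with
  | zero =>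
    intro fb kiri kanan h0 hkk hlen hfa hfb
    have hempty : (arr.take kanan.toNat).drop kiri.toNat = [] := by
      apply List.eq_nil_of_length_eq_zero
      simp [List.length_drop, List.length_take]; omega
    cases fb <;> simp [findMuridHilangLoop, findMuridHilangCari, hempty]
  | succ fa ih =>
    intro fb kiri kanan h0 hkk hlen hfa hfb
    set k := kiri.toNat with hk
    set K := kanan.toNat with hK
    have hkik : kiri = (k : Int) := by omega
    have hkan : kanan = (K : Int) := by omega
    have hKlen : K ≤ arr.length := by omega
    have hseglen : ((arr.take K).drop k).length = K - k := by
      simp [List.length_drop, List.length_take]; omega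
    by_cases h : kiri < kanan
    · have hkK : k < K := by omega
      obtain ⟨fb', rfl⟩ : ∃ fb', fb = fb' + 1 := by
        cases fb with
        | zero => exfalso; omega
        | succ m => exact ⟨m, rfl⟩
      have hne : ((arr.take K).drop k).isEmpty = false := by
        rw [List.isEmpty_eq_false_iff_exists_mem]
        have : 0 < ((arr.take K).drop k).length := by omega
        exact List.exists_mem_of_length_pos this
      rw [findMuridHilangLoop, findMuridHilangCari]
      simp only [if_pos h, hne, Bool.false_eq_true, if_false]
      -- the common probed index
      have htA : PySem.Int.floordiv (kiri + kanan) 2 = ((k + (K - k) / 2 : Nat) : Int) := by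
        rw [PySem.Int.floordiv_eq_ediv_of_pos (by omega), hkik, hkan]
        omega
      have htB : ((arr.take K).drop k).length / 2 = (K - k) / 2 := by rw [hseglen]
      set tB := (K - k) / 2 with htBdef
      have htBlt : k + tB < K := by omega
      have htlt : k + tB < arr.length := by omega
      have hgetA : PySem.List.pyGet? arr (((k + tB : Nat) : Int)) = some arr[k + tB] := by
        rw [PySem.List.pyGet?_natCast, List.getElem?_eq_getElem htlt]
      have hsegget : ((arr.take K).drop k).getD tB 0 = arr[k + tB] := by
        have hlt : tB < ((arr.take K).drop k).length := by omega
        rw [List.getD_eq_getElem _ _ hlt]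
        simp [List.getElem_drop, List.getElem_take]
      rw [htA, htB, hgetA, hsegget]
      have hoff : kiri + (tB : Int) = ((k + tB : Nat) : Int) := by omega
      by_cases hv : arr[k + tB] = ((k + tB : Nat) : Int)
      · have hb1 : (arr[k + tB] == ((k + tB : Nat) : Int)) = true := by simpa using hv
        have hb2 : (arr[k + tB] == kiri + (tB : Int)) = true := by rw [hoff]; exact hb1
        simp only [hb1, hb2, if_pos]
        have hdrop : ((arr.take K).drop k).drop (tB + 1) = (arr.take K).drop (k + (tB + 1)) := by
          rw [List.drop_drop]
        rw [hdrop]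
        have := ih fb' (((k + tB : Nat) : Int) + 1) kanan (by omega) (by omega) (by omega)
          (by omega) (by omega)
        have hcast : (((k + tB : Nat) : Int) + 1).toNat = k + (tB + 1) := by omega
        rw [this, hcast]
        congr 1
        omega
      · have hb1 : (arr[k + tB] == ((k + tB : Nat) : Int)) = false := by simpa using hv
        have hb2 : (arr[k + tB] == kiri + (tB : Int)) = false := by rw [hoff]; exact hb1
        simp only [hb1, hb2, Bool.false_eq_true, if_false]
        have htake : ((arr.take K).drop k).take tB = (arr.take (k + tB)).drop k := by
          rw [List.take_drop, List.take_take, show min (k + tB) K = k + tB by omega]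
        rw [htake]
        have := ih fb' kiri ((k + tB : Nat) : Int) (by omega) (by omega) (by omega)
          (by omega) (by omega)
        rw [this]
        have hcast : (((k + tB : Nat) : Int)).toNat = k + tB := by omega
        rw [hcast, ← hk]
      -- the two recursive calls above close both branches
    · have hempty : (arr.take K).drop k = [] := by
        apply List.eq_nil_of_length_eq_zero
        omega
      cases fb with
      | zero => simp [findMuridHilangLoop, findMuridHilangCari, h]
      | succ m => simp [findMuridHilangLoop, findMuridHilangCari, h, hempty]

-- ===== VERDICT (by name: the statement is the Claim_ definition above) =====
theorem findMuridHilang_spec : Claim_equal_findMuridHilang := by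
  intro arr N _ hpre
  unfold Spec_findMuridHilang findMuridHilang findMuridHilang_alt
  by_cases hN : N ≤ 1
  · -- kanan = N - 1 ≤ 0 = kiri: the loop exits at once with 0
    have : (N - 1).toNat = 0 := by omega
    rw [this]
    simp [findMuridHilangLoop, hN]
  · have hNlen : N ≤ (arr.length : Int) := by
      rcases hpre with h | h
      · omega
      · exact h
    simp only [if_neg hN]
    have hslice : PySem.List.slice arr none (some (N - 1)) = arr.take (N - 1).toNat := by
      have : (N - 1) = (((N - 1).toNat : Nat) : Int) := by omega
      rw [this, PySem.List.slice_to_natCast]; simp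
    rw [hslice]
    have hlen : (arr.take (N - 1).toNat).length = (N - 1).toNat := by
      rw [List.length_take]; omega
    have := loop_eq_cari arr (N - 1).toNat (arr.take (N - 1).toNat).length 0 (N - 1)
      (by omega) (by omega) (by omega) (by omega) (by omega)
    simpa using this
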